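-- pv_equiv track=rewrite | github.com/ece1786-2024/SurveyDash | refined_paper.py | parse_suggestions
-- ===== SOURCE A (Python) =====
-- def parse_suggestions(suggestions_text):
--     parsed_suggestions = []
--     sections = suggestions_text.split("\n\n")
--
--     current_block = []
--
--     for section in sections:
--         section = section.strip()
--         # Check if the section starts with "Section Title"
--         if section.startswith("Section Title:"):
--
--             if current_block:
--                 parsed_suggestions.append("\n\n".join(current_block))
--                 current_block = []
--
--
--             current_block.append(section)
--         else:
--
--             current_block.append(section)
--
--     if current_block:
--         parsed_suggestions.append("\n\n".join(current_block))
--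
--     return parsed_suggestions
-- ===== SOURCE B (Python) =====
-- def parse_suggestions(suggestions_text):
--     # Strip all sections up front, then cut the list at marker boundaries:
--     # each block is a maximal run starting at a cut and extending while the
--     # following sections are not "Section Title:" markers.
--     stripped = [s.strip() for s in suggestions_text.split("\n\n")]
--     out = []
--     i = 0
--     n = len(stripped)
--     while i < n:
--         j = i + 1
--         while j < n and not stripped[j].startswith("Section Title:"):
--             j += 1
--         out.append("\n\n".join(stripped[i:j]))
--         i = j
--     return out
-- ===== Notes on version B (the rewrite author's own statement) =====
-- stated objective: alternative
-- what changed: Replaces A's streaming accumulator loop that flushes a current block on each marker with a pre-stripped list that is cut into maximal runs: an index scan finds the end of each block (the next marker) and joins the slice directly.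
import Mathlib
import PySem

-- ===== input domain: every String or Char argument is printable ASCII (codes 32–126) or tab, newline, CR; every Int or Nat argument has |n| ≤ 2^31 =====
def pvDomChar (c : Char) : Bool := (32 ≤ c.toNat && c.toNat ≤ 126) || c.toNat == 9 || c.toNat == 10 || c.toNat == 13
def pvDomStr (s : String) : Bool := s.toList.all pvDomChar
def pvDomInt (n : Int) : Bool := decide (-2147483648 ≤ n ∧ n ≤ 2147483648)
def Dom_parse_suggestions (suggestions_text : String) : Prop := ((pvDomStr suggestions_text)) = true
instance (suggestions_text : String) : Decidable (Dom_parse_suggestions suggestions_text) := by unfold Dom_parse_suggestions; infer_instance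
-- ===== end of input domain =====

-- B cuts a pre-stripped section list into maximal runs at "Section Title:" markers
-- instead of A's streaming loop that flushes an accumulated current block; alternative decomposition, same cost.

-- ===== PORT A =====
-- one loop iteration of A: strip the section, flush the current block on a marker, append
def pvStepA (st : List String × List String) (sec : String) : List String × List String :=
  let s := PySem.Str.strip sec
  if PySem.Str.startswith s "Section Title:" then
    let st' := if st.2 ≠ [] then (st.1 ++ [PySem.Str.join "\n\n" st.2], ([] : List String)) else st
    (st'.1, st'.2 ++ [s])
  else
    (st.1, st.2 ++ [s])

def parse_suggestions (suggestions_text : String) : List String :=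
  let sections := (PySem.Str.split? suggestions_text "\n\n").getD []
  let res := sections.foldl pvStepA ([], [])
  if res.2 ≠ [] then res.1 ++ [PySem.Str.join "\n\n" res.2] else res.1

-- ===== PORT B =====
def pvMarker (s : String) : Bool := PySem.Str.startswith s "Section Title:"

-- B's outer loop: emit the maximal run of non-marker sections after the cut, then continue at the next cut
def pvBlocks : List String → List String
  | [] => []
  | x :: xs =>
    PySem.Str.join "\n\n" (x :: xs.takeWhile (fun s => !pvMarker s)) ::
      pvBlocks (xs.dropWhile (fun s => !pvMarker s))
termination_by l => l.length
decreasing_by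
  exact Nat.lt_succ_of_le (xs.length_dropWhile_le _)

def parse_suggestions_alt (suggestions_text : String) : List String :=
  pvBlocks (((PySem.Str.split? suggestions_text "\n\n").getD []).map PySem.Str.strip)

-- ===== PRECONDITION & SPEC =====
def Spec_parse_suggestions (suggestions_text : String) (out : List String) : Prop := out = parse_suggestions_alt suggestions_text
instance (suggestions_text : String) (out : List String) : Decidable (Spec_parse_suggestions suggestions_text out) := by unfold Spec_parse_suggestions; infer_instance

-- ===== CLAIM (what is proved, stated in full; the proofs are below) =====
def Claim_equal_parse_suggestions : Prop := ∀ (suggestions_text : String), Dom_parse_suggestions suggestions_text → Spec_parse_suggestions suggestions_text (parse_suggestions suggestions_text)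

-- ===== LEMMAS AND PROOFS =====

-- A's step on an already-stripped section
def pvStepA' (st : List String × List String) (s : String) : List String × List String :=
  if PySem.Str.startswith s "Section Title:" then
    let st' := if st.2 ≠ [] then (st.1 ++ [PySem.Str.join "\n\n" st.2], ([] : List String)) else st
    (st'.1, st'.2 ++ [s])
  else
    (st.1, st.2 ++ [s])

-- A's end-of-loop flush
def pvFin (st : List String × List String) : List String :=
  if st.2 ≠ [] then st.1 ++ [PySem.Str.join "\n\n" st.2] else st.1

theorem pvBlocks_nil : pvBlocks [] = [] := by rw [pvBlocks]

theorem pvBlocks_cons (x : String) (xs : List String) :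
    pvBlocks (x :: xs) =
      PySem.Str.join "\n\n" (x :: xs.takeWhile (fun s => !pvMarker s)) ::
        pvBlocks (xs.dropWhile (fun s => !pvMarker s)) := by rw [pvBlocks]

theorem pvKey (l : List String) : ∀ (p cb : List String), cb ≠ [] →
    pvFin (l.foldl pvStepA' (p, cb)) =
      p ++ PySem.Str.join "\n\n" (cb ++ l.takeWhile (fun s => !pvMarker s)) ::
        pvBlocks (l.dropWhile (fun s => !pvMarker s)) := by
  induction l with
  | nil => intro p cb h; simp [pvFin, pvBlocks_nil, h]
  | cons x xs ih =>
    intro p cb h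
    by_cases hm : pvMarker x = true
    · have hstep : pvStepA' (p, cb) x = (p ++ [PySem.Str.join "\n\n" cb], [x]) := by
        simp [pvStepA', pvMarker] at hm ⊢; simp [hm, h]
      simp only [List.foldl_cons, hstep, ih (p ++ [PySem.Str.join "\n\n" cb]) [x] (by simp),
        List.takeWhile_cons, List.dropWhile_cons, hm]
      simp [pvBlocks_cons]
    · have hstep : pvStepA' (p, cb) x = (p, cb ++ [x]) := by
        simp [pvStepA', pvMarker] at hm ⊢; simp [hm]
      simp only [List.foldl_cons, hstep, ih p (cb ++ [x]) (by simp),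
        List.takeWhile_cons, List.dropWhile_cons, hm]
      simp

-- ===== VERDICT (by name: the statement is the Claim_ definition above) =====
theorem parse_suggestions_spec : Claim_equal_parse_suggestions := by
  intro t _
  unfold Spec_parse_suggestions parse_suggestions parse_suggestions_alt
  show pvFin (((PySem.Str.split? t "\n\n").getD []).foldl pvStepA ([], [])) = _
  have hmap : ((PySem.Str.split? t "\n\n").getD []).foldl pvStepA ([], []) =
      (((PySem.Str.split? t "\n\n").getD []).map PySem.Str.strip).foldl pvStepA' ([], []) := by
    rw [List.foldl_map]; rfl
  rw [hmap]
  generalize ((PySem.Str.split? t "\n\n").getD []).map PySem.Str.strip = l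
  cases l with
  | nil => simp [pvFin, pvBlocks]
  | cons y ys =>
    have hfirst : pvStepA' ([], []) y = ([], [y]) := by
      by_cases hm : PySem.Str.startswith y "Section Title:" = true <;> simp [pvStepA']
    rw [List.foldl_cons, hfirst, pvKey ys [] [y] (by simp), pvBlocks_cons]
    simp
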